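-- pv_equiv track=rewrite | github.com/iamerrorman/Deeplearn-MJ | hu/lib_MJ.py | trandfer_discards
-- ===== SOURCE A (Python) =====
-- def trandfer_discards(discards, discards_op, handcards, type=34):
--     discards_map = {
--         0x01: 0,
--         0x02: 1,
--         0x03: 2,
--         0x04: 3,
--         0x05: 4,
--         0x06: 5,
--         0x07: 6,
--         0x08: 7,
--         0x09: 8,
--         0x11: 9,
--         0x12: 10,
--         0x13: 11,
--         0x14: 12,
--         0x15: 13,
--         0x16: 14,
--         0x17: 15,
--         0x18: 16,
--         0x19: 17,
--         0x21: 18,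
--         0x22: 19,
--         0x23: 20,
--         0x24: 21,
--         0x25: 22,
--         0x26: 23,
--         0x27: 24,
--         0x28: 25,
--         0x29: 26,
--         0x31: 27,
--         0x32: 28,
--         0x33: 29,
--         0x34: 30,
--         0x35: 31,
--         0x36: 32,
--         0x37: 33,
--     }
--     # print ("discards=",discards)
--     # print ("discards_op=",discards_op)
--     left_num = [4] * type
--     discards_list = [0] * type
--     # print "discards",discards
--     for per in discards:
--         for item in per:
--             # print "per",per
--             discards_list[discards_map[item]] += 1
--             left_num[discards_map[item]] -= 1
--     for seat_op in discards_op: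
--         for op in seat_op:
--             for item in op:
--                 discards_list[discards_map[item]] += 1
--                 left_num[discards_map[item]] -= 1
--     for item in handcards:
--         left_num[discards_map[item]] -= 1
--
--     # print ("trandfer_discards,left_num=",left_num)
--     return left_num, discards_list
-- ===== SOURCE B (Python) =====
-- def trandfer_discards(discards, discards_op, handcards, type=34):
--     discards_map = {
--         0x01: 0, 0x02: 1, 0x03: 2, 0x04: 3, 0x05: 4, 0x06: 5, 0x07: 6,
--         0x08: 7, 0x09: 8, 0x11: 9, 0x12: 10, 0x13: 11, 0x14: 12, 0x15: 13,
--         0x16: 14, 0x17: 15, 0x18: 16, 0x19: 17, 0x21: 18, 0x22: 19,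
--         0x23: 20, 0x24: 21, 0x25: 22, 0x26: 23, 0x27: 24, 0x28: 25,
--         0x29: 26, 0x31: 27, 0x32: 28, 0x33: 29, 0x34: 30, 0x35: 31,
--         0x36: 32, 0x37: 33,
--     }
--     # tally first, derive the arrays afterwards
--     dropped = [discards_map[item] for per in discards for item in per]
--     dropped += [discards_map[item] for seat_op in discards_op for op in seat_op for item in op]
--     held = [discards_map[item] for item in handcards]
--     dcnt = {}
--     for i in dropped:
--         dcnt[i] = dcnt.get(i, 0) + 1
--     hcnt = {}
--     for i in held:
--         hcnt[i] = hcnt.get(i, 0) + 1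
--     discards_list = [dcnt.get(i, 0) for i in range(type)]
--     left_num = [4 - dcnt.get(i, 0) - hcnt.get(i, 0) for i in range(type)]
--     return left_num, discards_list
-- ===== Notes on version B (the rewrite author's own statement) =====
-- stated objective: simpler
-- what changed: B tallies all mapped tiles into two count dictionaries first and then derives both output arrays in one final pass over range(type), instead of A's in-place incremental updates of two preallocated arrays inside every loop.
import Mathlib
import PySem

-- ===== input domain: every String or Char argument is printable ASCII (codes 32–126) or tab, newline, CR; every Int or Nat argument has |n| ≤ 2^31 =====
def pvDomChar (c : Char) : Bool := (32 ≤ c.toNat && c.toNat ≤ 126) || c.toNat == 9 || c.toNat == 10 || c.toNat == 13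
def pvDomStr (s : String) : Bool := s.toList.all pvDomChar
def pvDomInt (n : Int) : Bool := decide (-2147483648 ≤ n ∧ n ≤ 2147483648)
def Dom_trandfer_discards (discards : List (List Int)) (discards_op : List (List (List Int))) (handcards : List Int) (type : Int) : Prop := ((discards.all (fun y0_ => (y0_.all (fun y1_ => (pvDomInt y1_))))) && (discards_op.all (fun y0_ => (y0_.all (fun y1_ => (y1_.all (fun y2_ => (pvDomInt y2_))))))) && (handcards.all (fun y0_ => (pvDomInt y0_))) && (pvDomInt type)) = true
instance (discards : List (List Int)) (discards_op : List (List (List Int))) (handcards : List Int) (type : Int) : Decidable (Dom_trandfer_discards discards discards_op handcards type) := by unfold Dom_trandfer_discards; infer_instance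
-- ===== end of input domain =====

-- B tallies the mapped tiles into count dictionaries first and derives both arrays in one
-- final pass over range(type); A updates two preallocated arrays in place inside every loop.
-- Objective: simpler decomposition (same asymptotic cost).

-- ===== PORT A =====
-- the literal discards_map dictionary of the Python source (shared by both ports)
def pvDmap : PySem.Dict Int Int := PySem.Dict.mk
  [(0x01, 0), (0x02, 1), (0x03, 2), (0x04, 3), (0x05, 4), (0x06, 5), (0x07, 6),
   (0x08, 7), (0x09, 8), (0x11, 9), (0x12, 10), (0x13, 11), (0x14, 12), (0x15, 13),
   (0x16, 14), (0x17, 15), (0x18, 16), (0x19, 17), (0x21, 18), (0x22, 19),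
   (0x23, 20), (0x24, 21), (0x25, 22), (0x26, 23), (0x27, 24), (0x28, 25),
   (0x29, 26), (0x31, 27), (0x32, 28), (0x33, 29), (0x34, 30), (0x35, 31),
   (0x36, 32), (0x37, 33)]

-- discards_map[item] (total form; Pre_ guarantees the key is present)
def pvLook (item : Int) : Int := pvDmap.getD item 0

-- lst[i] += d  (total form; Pre_ guarantees i is in range)
def pvBump (l : List Int) (i d : Int) : List Int :=
  PySem.List.pySetD l i (PySem.List.pyGetD l i 0 + d)

def trandfer_discards (discards : List (List Int)) (discards_op : List (List (List Int))) (handcards : List Int) (type : Int) : List Int × List Int :=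
  let left_num0 := List.replicate type.toNat (4 : Int)
  let discards_list0 := List.replicate type.toNat (0 : Int)
  -- for per in discards: for item in per: ...
  let st1 := discards.foldl (fun st per =>
      per.foldl (fun st item =>
        (pvBump st.1 (pvLook item) 1, pvBump st.2 (pvLook item) (-1))) st)
    (discards_list0, left_num0)
  -- for seat_op in discards_op: for op in seat_op: for item in op: ...
  let st2 := discards_op.foldl (fun st seat_op =>
      seat_op.foldl (fun st op =>
        op.foldl (fun st item =>
          (pvBump st.1 (pvLook item) 1, pvBump st.2 (pvLook item) (-1))) st) st)
    st1
  -- for item in handcards: left_num[...] -= 1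
  let left_num := handcards.foldl (fun ln item => pvBump ln (pvLook item) (-1)) st2.2
  (left_num, st2.1)

-- ===== PORT B =====
def trandfer_discards_alt (discards : List (List Int)) (discards_op : List (List (List Int))) (handcards : List Int) (type : Int) : List Int × List Int :=
  let dropped := (discards.flatMap (fun per => per.map pvLook))
      ++ (discards_op.flatMap (fun seat_op => seat_op.flatMap (fun op => op.map pvLook)))
  let held := handcards.map pvLook
  let dcnt := dropped.foldl (fun d i => d.insert i (d.getD i 0 + 1)) PySem.Dict.empty
  let hcnt := held.foldl (fun d i => d.insert i (d.getD i 0 + 1)) PySem.Dict.empty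
  let discards_list := (PySem.List.pyRange 0 type 1).map (fun i => dcnt.getD i 0)
  let left_num := (PySem.List.pyRange 0 type 1).map (fun i => 4 - dcnt.getD i 0 - hcnt.getD i 0)
  (left_num, discards_list)

-- ===== PRECONDITION & SPEC =====
-- a tile is fine iff it is a key of discards_map and its index is < type (else A raises KeyError/IndexError)
def pvOkTile (type item : Int) : Bool := pvDmap.contains item && decide (pvDmap.getD item 0 < type)

-- Pre_ excludes exactly the inputs where Python A raises: a tile that is not a key of
-- discards_map (KeyError) or whose mapped index is ≥ type (IndexError).
def Pre_trandfer_discards (discards : List (List Int)) (discards_op : List (List (List Int))) (handcards : List Int) (type : Int) : Prop :=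
  (discards.all (fun per => per.all (pvOkTile type))
    && discards_op.all (fun seat_op => seat_op.all (fun op => op.all (pvOkTile type)))
    && handcards.all (pvOkTile type)) = true
instance (discards : List (List Int)) (discards_op : List (List (List Int))) (handcards : List Int) (type : Int) : Decidable (Pre_trandfer_discards discards discards_op handcards type) := by unfold Pre_trandfer_discards; infer_instance

def pvWitness_trandfer_discards : List (List Int) × List (List (List Int)) × List Int × Int :=
  ([[0x01, 0x02]], [[[0x11]], []], [0x21, 0x21], 34)

def Spec_trandfer_discards (discards : List (List Int)) (discards_op : List (List (List Int))) (handcards : List Int) (type : Int) (out : List Int × List Int) : Prop := out = trandfer_discards_alt discards discards_op handcards type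
instance (discards : List (List Int)) (discards_op : List (List (List Int))) (handcards : List Int) (type : Int) (out : List Int × List Int) : Decidable (Spec_trandfer_discards discards discards_op handcards type out) := by unfold Spec_trandfer_discards; infer_instance

-- ===== CLAIM (what is proved, stated in full; the proofs are below) =====
def Claim_equal_trandfer_discards : Prop := ∀ (discards : List (List Int)) (discards_op : List (List (List Int))) (handcards : List Int) (type : Int), Dom_trandfer_discards discards discards_op handcards type → Pre_trandfer_discards discards discards_op handcards type → Spec_trandfer_discards discards discards_op handcards type (trandfer_discards discards discards_op handcards type)
-- ===== LEMMAS AND PROOFS =====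

theorem pv_getD_mk_nonneg (l : List (Int × Int)) (h : ∀ p ∈ l, 0 ≤ p.2) (k : Int) :
    0 ≤ (PySem.Dict.mk l).getD k 0 := by
  induction l with
  | nil => simp [PySem.Dict.getD_eq_get?_getD, PySem.Dict.get?]
  | cons p rest ih =>
    obtain ⟨a, v⟩ := p
    rw [PySem.Dict.getD_eq_get?_getD, PySem.Dict.get?_mk_cons]
    split
    · exact h (a, v) (by simp)
    · rw [← PySem.Dict.getD_eq_get?_getD]
      exact ih (fun q hq => h q (List.mem_cons_of_mem _ hq))

theorem pv_look_nonneg (item : Int) : 0 ≤ pvLook item := by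
  unfold pvLook pvDmap
  exact pv_getD_mk_nonneg _ (by decide) item

theorem pv_foldl_prod_split {α β ι : Type} (g : α → ι → α) (h : β → ι → β) (L : List ι)
    (a : α) (b : β) :
    L.foldl (fun st i => (g st.1 i, h st.2 i)) (a, b) = (L.foldl g a, L.foldl h b) := by
  induction L generalizing a b with
  | nil => rfl
  | cons i L ih => simpa using ih (g a i) (h b i)

theorem pv_foldl2 {σ : Type} (f : σ → Int → σ) (L : List (List Int)) (s : σ) :
    L.foldl (fun st per => per.foldl f st) s = L.flatten.foldl f s :=
  (List.foldl_flatten).symm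

theorem pv_foldl3 {σ : Type} (f : σ → Int → σ) (L : List (List (List Int))) (s : σ) :
    L.foldl (fun st seat => seat.foldl (fun st op => op.foldl f st) st) s
      = L.flatten.flatten.foldl f s := by
  rw [List.foldl_flatten, List.foldl_flatten]

theorem pv_length_foldl_bump (d : Int) (L : List Int) (l : List Int) :
    (L.foldl (fun acc i => pvBump acc i d) l).length = l.length := by
  induction L generalizing l with
  | nil => rfl
  | cons i L ih =>
    rw [List.foldl_cons, ih]
    simp [pvBump, PySem.List.length_pySetD]

theorem pv_foldl_bump_getD (d : Int) (L : List Int) (l : List Int)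
    (hL : ∀ i ∈ L, 0 ≤ i ∧ i < (l.length : Int)) (j : Nat) (hj : j < l.length) :
    PySem.List.pyGetD (L.foldl (fun acc i => pvBump acc i d) l) (j : Int) 0
      = PySem.List.pyGetD l (j : Int) 0 + d * (L.count (j : Int)) := by
  induction L generalizing l with
  | nil => simp
  | cons i L ih =>
    obtain ⟨hi0, hilen⟩ := hL i (by simp)
    have hn : i = ((i.toNat : Nat) : Int) := (Int.toNat_of_nonneg hi0).symm
    have hlt : i.toNat < l.length := by omega
    have hlen' : (pvBump l i d).length = l.length := by
      simp [pvBump, PySem.List.length_pySetD]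
    rw [List.foldl_cons,
      ih (pvBump l i d)
        (fun x hx => by rw [hlen']; exact hL x (List.mem_cons_of_mem _ hx))
        (by omega : j < (pvBump l i d).length)]
    have hget : PySem.List.pyGetD (pvBump l i d) (j : Int) 0
        = if j = i.toNat then PySem.List.pyGetD l (i : Int) 0 + d
          else PySem.List.pyGetD l (j : Int) 0 := by
      conv_lhs => rw [pvBump, hn]
      rw [PySem.List.pyGetD_pySetD_natCast l i.toNat j _ 0 hlt, ← hn]
    rw [hget, List.count_cons]
    by_cases hji : j = i.toNat
    · have hii : ((i : Int) == (j : Int)) = true := by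
        simp only [beq_iff_eq]; omega
      rw [if_pos hji, hii]
      have hij : (i : Int) = (j : Int) := by omega
      rw [hij]
      simp
      ring
    · have hne : ((i : Int) == (j : Int)) = false := by
        simp only [beq_eq_false_iff_ne, ne_eq]; omega
      rw [if_neg hji, hne]
      push_cast
      ring

theorem pv_pre_ok {discards : List (List Int)} {discards_op : List (List (List Int))}
    {handcards : List Int} {type : Int}
    (hpre : Pre_trandfer_discards discards discards_op handcards type) :
    ∀ it, ((∃ per ∈ discards, it ∈ per) ∨ (∃ seat ∈ discards_op, ∃ op ∈ seat, it ∈ op)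
        ∨ it ∈ handcards) → 0 ≤ pvLook it ∧ pvLook it < type := by
  unfold Pre_trandfer_discards at hpre
  simp only [Bool.and_eq_true, List.all_eq_true] at hpre
  obtain ⟨⟨h1, h2⟩, h3⟩ := hpre
  intro it hit
  have hok : pvOkTile type it = true := by
    rcases hit with ⟨per, hper, hin⟩ | ⟨seat, hseat, op, hop, hin⟩ | hin
    · exact h1 per hper it hin
    · exact h2 seat hseat op hop it hin
    · exact h3 it hin
  unfold pvOkTile at hok
  simp only [Bool.and_eq_true, decide_eq_true_eq] at hok
  exact ⟨pv_look_nonneg it, hok.2⟩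

theorem pv_bound {discards : List (List Int)} {discards_op : List (List (List Int))}
    {handcards : List Int} {type : Int}
    (hpre : Pre_trandfer_discards discards discards_op handcards type) :
    ∀ i ∈ (discards.flatten ++ discards_op.flatten.flatten).map pvLook
        ++ handcards.map pvLook,
      0 ≤ i ∧ i < (type.toNat : Int) := by
  intro i hi
  have hself := Int.self_le_toNat type
  rcases List.mem_append.mp hi with hd | hh
  · obtain ⟨it, hit, rfl⟩ := List.mem_map.mp hd
    rcases List.mem_append.mp hit with h1 | h2
    · obtain ⟨per, hper, hin⟩ := List.mem_flatten.mp h1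
      have := pv_pre_ok hpre it (Or.inl ⟨per, hper, hin⟩)
      omega
    · obtain ⟨seat', hseat', hin'⟩ := List.mem_flatten.mp h2
      obtain ⟨seat, hseat, hseatmem⟩ := List.mem_flatten.mp hseat'
      have := pv_pre_ok hpre it (Or.inr (Or.inl ⟨seat, hseat, seat', hseatmem, hin'⟩))
      omega
  · obtain ⟨it, hit, rfl⟩ := List.mem_map.mp hh
    have := pv_pre_ok hpre it (Or.inr (Or.inr hit))
    omega

theorem pv_fold_items (L : List Int) (a b : List Int) :
    L.foldl (fun st item => (pvBump st.1 (pvLook item) 1, pvBump st.2 (pvLook item) (-1))) (a, b)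
      = ((L.map pvLook).foldl (fun x i => pvBump x i 1) a,
         (L.map pvLook).foldl (fun x i => pvBump x i (-1)) b) := by
  rw [pv_foldl_prod_split (fun x item => pvBump x (pvLook item) 1)
      (fun x item => pvBump x (pvLook item) (-1)) L a b,
    List.foldl_map, List.foldl_map]

theorem pv_flatMap_map (L : List (List Int)) :
    L.flatMap (fun per => per.map pvLook) = L.flatten.map pvLook := by
  induction L with
  | nil => rfl
  | cons per rest ih => simp [ih]

theorem pv_dropped_eq (discards : List (List Int)) (discards_op : List (List (List Int))) :
    discards.flatMap (fun per => per.map pvLook)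
      ++ discards_op.flatMap (fun seat_op => seat_op.flatMap (fun op => op.map pvLook))
      = (discards.flatten ++ discards_op.flatten.flatten).map pvLook := by
  simp only [List.map_append]
  congr 1
  · exact pv_flatMap_map discards
  · induction discards_op with
    | nil => rfl
    | cons seat rest ih =>
      simp [List.flatMap_cons, List.flatten_cons, List.map_append, ih, pv_flatMap_map seat]

theorem pv_fold_hand (L : List Int) (l : List Int) :
    L.foldl (fun ln item => pvBump ln (pvLook item) (-1)) l
      = (L.map pvLook).foldl (fun x i => pvBump x i (-1)) l :=
  by rw [List.foldl_map]

-- ===== VERDICT (by name: the statement is the Claim_ definition above) =====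
theorem trandfer_discards_spec : Claim_equal_trandfer_discards := by
  intro discards discards_op handcards type _ hpre
  simp only [Spec_trandfer_discards, trandfer_discards, trandfer_discards_alt]
  rw [pv_foldl2, pv_foldl3, ← List.foldl_append, pv_fold_items, pv_dropped_eq,
    PySem.Dict.foldl_insert_getD_add_one_eq_counter,
    PySem.Dict.foldl_insert_getD_add_one_eq_counter]
  dsimp only
  rw [pv_fold_hand, ← List.foldl_append]
  have hbound := pv_bound hpre
  set D : List Int := (discards.flatten ++ discards_op.flatten.flatten).map pvLook with hD
  set H : List Int := handcards.map pvLook with hH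
  have hbD : ∀ i ∈ D, 0 ≤ i ∧ i < (type.toNat : Int) :=
    fun i hi => hbound i (List.mem_append_left _ hi)
  have hbDH : ∀ i ∈ D ++ H, 0 ≤ i ∧ i < (type.toNat : Int) := hbound
  rw [Prod.mk.injEq]
  constructor
  · -- left_num component
    apply List.ext_getElem
    · rw [pv_length_foldl_bump]
      simp [PySem.List.length_pyRange_one]
    · intro n h1 h2
      have hn : n < type.toNat := by
        rw [pv_length_foldl_bump] at h1; simpa using h1
      have hlen4 : (List.replicate type.toNat (4 : Int)).length = type.toNat := by simp
      have := pv_foldl_bump_getD (-1) (D ++ H) (List.replicate type.toNat (4 : Int))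
        (by rw [hlen4]; exact hbDH) n (by omega)
      rw [PySem.List.pyGetD_natCast, PySem.List.pyGetD_natCast,
        List.getD_eq_getElem _ _ (by rw [pv_length_foldl_bump]; omega),
        List.getD_eq_getElem _ _ (by omega)] at this
      rw [this]
      rw [List.getElem_map, PySem.List.getElem_pyRange_one]
      simp only [List.getElem_replicate, PySem.Dict.getD_counter, List.count_append, zero_add]
      push_cast
      ring
  · -- discards_list component
    apply List.ext_getElem
    · rw [pv_length_foldl_bump]
      simp [PySem.List.length_pyRange_one]
    · intro n h1 h2
      have hn : n < type.toNat := by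
        rw [pv_length_foldl_bump] at h1; simpa using h1
      have hlen0 : (List.replicate type.toNat (0 : Int)).length = type.toNat := by simp
      have := pv_foldl_bump_getD 1 D (List.replicate type.toNat (0 : Int))
        (by rw [hlen0]; exact hbD) n (by omega)
      rw [PySem.List.pyGetD_natCast, PySem.List.pyGetD_natCast,
        List.getD_eq_getElem _ _ (by rw [pv_length_foldl_bump]; omega),
        List.getD_eq_getElem _ _ (by omega)] at this
      rw [this]
      rw [List.getElem_map, PySem.List.getElem_pyRange_one]
      simp [PySem.Dict.getD_counter]
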